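-- pv_equiv track=rewrite | github.com/Gabriel-Kelvin/multiagent_mcp | utils/chart_utils.py | _pick_categorical_column
-- ===== SOURCE A (Python) =====
-- from typing import List, Dict, Any, Optional, Tuple
--
-- def _pick_categorical_column(rows: List[Dict[str, Any]]) -> Optional[str]:
--     if not rows:
--         return None
--     # prefer string-like columns or those with few unique values
--     sample = rows[:500]
--     candidates = {}
--     for k in rows[0].keys():
--         vals = [str(r.get(k, "")) for r in sample]
--         uniq = len(set(vals))
--         candidates[k] = uniq
--     # pick column with smallest unique count but > 1
--     sorted_cols = sorted(candidates.items(), key=lambda kv: kv[1])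
--     for col, uniq in sorted_cols:
--         if 1 < uniq <= max(50, len(sample) // 2):
--             return col
--     # fallback: first column
--     return list(rows[0].keys())[0]
-- ===== SOURCE B (Python) =====
-- from typing import List, Dict, Any, Optional
--
-- def _pick_categorical_column(rows: List[Dict[str, Any]]) -> Optional[str]:
--     if not rows:
--         return None
--     sample = rows[:500]
--     t = max(50, len(sample) // 2)
--     best = None  # (column, unique-count) with smallest count seen so far
--     for k in rows[0].keys():
--         uniq = len({str(r.get(k, "")) for r in sample})
--         if 1 < uniq <= t and (best is None or uniq < best[1]):
--             best = (k, uniq)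
--     if best is not None:
--         return best[0]
--     # fallback: first column
--     return list(rows[0].keys())[0]
-- ===== Notes on version B (the rewrite author's own statement) =====
-- stated objective: simpler
-- what changed: Replaced A's candidates dict + stable sort + scan of the sorted pairs by a single linear min-selection pass over the columns (strict '<' preserves the first-column tie-break of the stable sort), keeping the empty guard, the 500-row sample and the threshold.
import Mathlib
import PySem

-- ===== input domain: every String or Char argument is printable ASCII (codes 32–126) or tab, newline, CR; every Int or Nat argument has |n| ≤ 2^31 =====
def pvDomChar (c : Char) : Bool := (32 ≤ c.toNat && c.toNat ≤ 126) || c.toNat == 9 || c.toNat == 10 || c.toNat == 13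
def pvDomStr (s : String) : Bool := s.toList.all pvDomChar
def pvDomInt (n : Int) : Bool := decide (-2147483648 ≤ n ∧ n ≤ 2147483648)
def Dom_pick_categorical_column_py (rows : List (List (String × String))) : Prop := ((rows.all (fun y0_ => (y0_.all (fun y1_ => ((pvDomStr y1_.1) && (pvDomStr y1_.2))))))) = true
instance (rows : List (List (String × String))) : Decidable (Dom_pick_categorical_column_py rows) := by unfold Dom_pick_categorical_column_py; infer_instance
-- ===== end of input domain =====

-- B replaces A's candidates-dict + stable sort + scan by a single linear min-selection
-- pass over the columns (strict '<' keeps the first column on ties): simpler, no sort.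


-- ===== PORT A =====
-- shared helper: the distinct keys of rows[0] (Python dict keys, insertion order)
def pvKeys (r0 : List (String × String)) : List String :=
  PySem.Set.ofList (r0.map (fun p => p.1))

-- shared helper: uniq = len(set(str(r.get(k, "")) for r in sample)) — both Pythons compute it verbatim
def pvUniq (sample : List (List (String × String))) (k : String) : Int :=
  ((PySem.Set.ofList (sample.map (fun r => (PySem.Dict.mk r).getD k ""))).length : Int)

def pick_categorical_column_py (rows : List (List (String × String))) : Option String :=
  match rows with
  | [] => none
  | r0 :: _ =>
    let sample := PySem.List.slice rows none (some (500 : Int))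
    let candidates : PySem.Dict String Int :=
      (pvKeys r0).foldl (fun d k => d.insert k (pvUniq sample k)) (PySem.Dict.mk [])
    let sorted_cols := PySem.List.sorted candidates.items (fun kv => kv.2)
    let t : Int := max 50 (PySem.Int.floordiv (sample.length : Int) 2)
    match sorted_cols.find? (fun kv => decide (1 < kv.2 ∧ kv.2 ≤ t)) with
    | some kv => some kv.1
    | none => (pvKeys r0).head?   -- list(rows[0].keys())[0]; r0 = [] raises IndexError, excluded by Pre_

-- ===== PORT B =====
def pick_categorical_column_py_alt (rows : List (List (String × String))) : Option String :=
  match rows with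
  | [] => none
  | r0 :: _ =>
    let sample := PySem.List.slice rows none (some (500 : Int))
    let t : Int := max 50 (PySem.Int.floordiv (sample.length : Int) 2)
    let best : Option (String × Int) :=
      (pvKeys r0).foldl (fun best k =>
        let uniq := pvUniq sample k
        if (1 < uniq ∧ uniq ≤ t) ∧ (∀ b ∈ best, uniq < b.2)
        then some (k, uniq) else best) none
    match best with
    | some b => some b.1
    | none => (pvKeys r0).head?   -- fallback: first column; r0 = [] raises IndexError, excluded by Pre_

-- ===== PRECONDITION & SPEC =====
-- Pre_ excludes exactly the inputs where Python A raises IndexError: a nonempty rows whose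
-- first row is the empty dict (the fallback list(rows[0].keys())[0] then has no element).
def Pre_pick_categorical_column_py (rows : List (List (String × String))) : Prop :=
  rows.head? ≠ some []
instance (rows : List (List (String × String))) : Decidable (Pre_pick_categorical_column_py rows) := by unfold Pre_pick_categorical_column_py; infer_instance
def pvWitness_pick_categorical_column_py : (List (List (String × String))) :=
  [[("a", "x"), ("b", "y")], [("a", "x"), ("b", "z")]]

def Spec_pick_categorical_column_py (rows : List (List (String × String))) (out : Option String) : Prop := out = pick_categorical_column_py_alt rows
instance (rows : List (List (String × String))) (out : Option String) : Decidable (Spec_pick_categorical_column_py rows out) := by unfold Spec_pick_categorical_column_py; infer_instance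

-- ===== CLAIM (what is proved, stated in full; the proofs are below) =====
def Claim_equal_pick_categorical_column_py : Prop := ∀ (rows : List (List (String × String))), Dom_pick_categorical_column_py rows → Pre_pick_categorical_column_py rows → Spec_pick_categorical_column_py rows (pick_categorical_column_py rows)

-- ===== LEMMAS AND PROOFS =====

-- B's one-pass loop body, abstracted over the qualifying predicate P on the unique count.
def pvStep (P : Int → Prop) [DecidablePred P]
    (best : Option (String × Int)) (kv : String × Int) : Option (String × Int) :=
  if P kv.2 ∧ (∀ b ∈ best, kv.2 < b.2) then some kv else best

-- insertBy into a snd-sorted list keeps it snd-sorted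
theorem pvInsertBy_pairwise (x : String × Int) (ys : List (String × Int))
    (h : ys.Pairwise (fun a b => a.2 ≤ b.2)) :
    (PySem.List.insertBy (fun a b => decide (a.2 < b.2)) x ys).Pairwise (fun a b => a.2 ≤ b.2) := by
  induction ys with
  | nil => simp [PySem.List.insertBy]
  | cons y ys ih =>
    rw [List.pairwise_cons] at h
    obtain ⟨hy, hys⟩ := h
    simp only [PySem.List.insertBy]
    split_ifs with hlt
    · simp only [decide_eq_true_eq] at hlt
      refine List.Pairwise.cons ?_ (List.Pairwise.cons hy hys)
      intro z hz
      rcases List.mem_cons.mp hz with rfl | hz'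
      · omega
      · have := hy z hz'; omega
    · simp only [decide_eq_true_eq] at hlt
      refine List.Pairwise.cons ?_ (ih hys)
      intro z hz
      rw [PySem.List.mem_insertBy] at hz
      rcases hz with rfl | hz'
      · omega
      · exact hy z hz'

-- one insertion step: find?-on-sorted commutes with B's min-selection step
theorem pvFind_insertBy (P : Int → Prop) [DecidablePred P] (x : String × Int)
    (ys : List (String × Int)) (h : ys.Pairwise (fun a b => a.2 ≤ b.2)) :
    (PySem.List.insertBy (fun a b => decide (a.2 < b.2)) x ys).find?
        (fun kv => decide (P kv.2))
      = pvStep P (ys.find? (fun kv => decide (P kv.2))) x := by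
  induction ys with
  | nil =>
    by_cases hp : P x.2 <;> simp [PySem.List.insertBy, List.find?, pvStep, hp]
  | cons y ys ih =>
    rw [List.pairwise_cons] at h
    obtain ⟨hy, hys⟩ := h
    simp only [PySem.List.insertBy]
    split_ifs with hlt
    · simp only [decide_eq_true_eq] at hlt
      by_cases hp : P x.2
      · by_cases hpy : P y.2
        · simp [List.find?, hp, hpy, pvStep, hlt]
        · simp only [List.find?, hp, hpy, decide_true, decide_false, pvStep]
          cases hfind : ys.find? (fun kv => decide (P kv.2)) with
          | none => simp
          | some b =>
            have hb : b ∈ ys := List.mem_of_find?_eq_some hfind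
            have hyb := hy b hb
            rw [if_pos ⟨trivial, by simpa using (by omega : x.2 < b.2)⟩]
      · simp [List.find?, pvStep, hp]
    · simp only [decide_eq_true_eq] at hlt
      by_cases hpy : P y.2
      · simp only [List.find?, hpy, decide_true, pvStep]
        rw [if_neg]
        rintro ⟨-, hall⟩
        have := hall y (by simp)
        omega
      · simp only [List.find?, hpy, decide_false]
        exact ih hys

-- fold invariant: B's fold over a prefix equals find? on the sorted prefix
theorem pvFold_eq_find_sorted_aux (P : Int → Prop) [DecidablePred P]
    (l : List (String × Int)) (ys : List (String × Int))
    (h : ys.Pairwise (fun a b => a.2 ≤ b.2)) :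
    l.foldl (pvStep P) (ys.find? (fun kv => decide (P kv.2)))
      = (l.foldl (fun acc x => PySem.List.insertBy (fun a b => decide (a.2 < b.2)) x acc) ys).find?
          (fun kv => decide (P kv.2)) := by
  induction l generalizing ys with
  | nil => rfl
  | cons x l ih =>
    simp only [List.foldl_cons]
    rw [← pvFind_insertBy P x ys h]
    exact ih _ (pvInsertBy_pairwise x ys h)

theorem pvFold_eq_find_sorted (P : Int → Prop) [DecidablePred P] (l : List (String × Int)) :
    l.foldl (pvStep P) none
      = (PySem.List.sorted l (fun kv => kv.2)).find? (fun kv => decide (P kv.2)) := by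
  rw [PySem.List.sorted_eq_foldl_insertBy]
  have := pvFold_eq_find_sorted_aux P l [] List.Pairwise.nil
  simpa using this

-- A's candidates dict over distinct keys lists each key with its count, in order
theorem pvItems_fold_insert (f : String → Int) (ks : List String) (acc : List (String × Int))
    (hnd : ks.Nodup) (hdisj : ∀ k ∈ ks, k ∉ acc.map (fun p => p.1)) :
    (ks.foldl (fun d k => d.insert k (f k)) (PySem.Dict.mk acc)).items
      = acc ++ ks.map (fun k => (k, f k)) := by
  induction ks generalizing acc with
  | nil => simp
  | cons k ks ih =>
    rw [List.nodup_cons] at hnd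
    simp only [List.foldl_cons]
    have hnotin : k ∉ acc.map (fun p => p.1) := hdisj k (by simp)
    have hins : (PySem.Dict.mk acc).insert k (f k) = PySem.Dict.mk (acc ++ [(k, f k)]) := by
      rw [PySem.Dict.insert]
      rw [if_neg]
      simp only [PySem.Dict.contains]
      intro hcon
      rw [List.any_eq_true] at hcon
      obtain ⟨p, hp, hpk⟩ := hcon
      exact hnotin (List.mem_map.mpr ⟨p, hp, by simpa using hpk⟩)
    rw [hins, ih (acc ++ [(k, f k)]) hnd.2 ?_]
    · simp
    · intro k' hk'
      simp only [List.map_append, List.mem_append]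
      rintro (h1 | h2)
      · exact hdisj k' (by simp [hk']) h1
      · simp only [List.map_cons, List.map_nil, List.mem_cons] at h2
        rcases h2 with h2 | h2
        · exact hnd.1 (h2 ▸ hk')
        · simp at h2

-- ===== VERDICT (by name: the statement is the Claim_ definition above) =====
theorem pick_categorical_column_py_spec : Claim_equal_pick_categorical_column_py := by
  intro rows _ _
  unfold Spec_pick_categorical_column_py
  cases rows with
  | nil => rfl
  | cons r0 rest =>
    simp only [pick_categorical_column_py, pick_categorical_column_py_alt]
    have hitems := pvItems_fold_insert
      (fun k => pvUniq (PySem.List.slice (r0 :: rest) none (some (500 : Int))) k)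
      (pvKeys r0) [] (PySem.Set.nodup_ofList _) (by simp)
    set sample := PySem.List.slice (r0 :: rest) none (some (500 : Int)) with hs
    set t : Int := max 50 (PySem.Int.floordiv (sample.length : Int) 2) with ht
    have hfold := pvFold_eq_find_sorted (fun u => 1 < u ∧ u ≤ t)
      ((pvKeys r0).map (fun k => (k, pvUniq sample k)))
    rw [List.foldl_map] at hfold
    simp only [List.nil_append] at hitems
    rw [hitems]
    rw [← hfold]
    simp only [pvStep]
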